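-- pv_equiv track=rewrite | github.com/mo-hssein/data-structures-algorithms | Greedy Algorithms/optimal_merge_pattern.py | optimal_merge_pattern
-- ===== SOURCE A (Python) =====
-- def optimal_merge_pattern(sizes):
--     """
--     Merge the files optimally to minimize the total cost of merging.
--     Time complexity: O(n log n)
--
--     Args:
--     - sizes (list[int]): List of files sizes.
--
--     Returns:
--     - cost (int): Total cost of merging.
--     """
--
--     # if sizes is small
--     if len(sizes) < 1:
--         return 0
--     elif len(sizes) < 2:
--         return sizes[0]
--
--     # Sort the items in ascending order so we can combine them at the lowest cost
--     sizes.sort()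
--
--     # final cost
--     cost = 0
--
--     # Loop to repeat the merge until only one element remains
--     while len(sizes) > 1:
--         first_digit = sizes.pop(0)
--         second_digit = sizes.pop(0)
--         cost += first_digit + second_digit
--         sizes.append(first_digit + second_digit)
--
--         # Sorting again to keep the lowest cost on top
--         sizes.sort()
--
--     return cost
-- ===== SOURCE B (Python) =====
-- def optimal_merge_pattern(sizes):
--     """Minimum total cost of merging the files (two-queue Huffman: sort once,
--     then always combine the two smallest of the sorted originals and the
--     FIFO queue of already-produced sums). Does not mutate the caller's list."""
--     n = len(sizes)
--     if n == 0:
--         return 0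
--     if n == 1:
--         return sizes[0]
--     q1 = sorted(sizes)
--     q2 = []
--     i = 0
--     j = 0
--     cost = 0
--
--     def take():
--         nonlocal i, j
--         if j >= len(q2) or (i < len(q1) and q1[i] <= q2[j]):
--             v = q1[i]
--             i += 1
--         else:
--             v = q2[j]
--             j += 1
--         return v
--
--     for _ in range(n - 1):
--         a = take()
--         b = take()
--         cost += a + b
--         q2.append(a + b)
--     return cost
-- ===== Notes on version B (the rewrite author's own statement) =====
-- stated objective: faster
-- what changed: Replaces A's re-sort-the-whole-list-after-every-merge loop (with O(n) pop(0)s) by the classic two-queue Huffman scheme: sort once, then repeatedly take the two smallest among the sorted originals and a FIFO queue of produced sums, which stays sorted by itself; B also does not mutate the caller's list, while A sorts and empties it in place.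
import Mathlib
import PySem

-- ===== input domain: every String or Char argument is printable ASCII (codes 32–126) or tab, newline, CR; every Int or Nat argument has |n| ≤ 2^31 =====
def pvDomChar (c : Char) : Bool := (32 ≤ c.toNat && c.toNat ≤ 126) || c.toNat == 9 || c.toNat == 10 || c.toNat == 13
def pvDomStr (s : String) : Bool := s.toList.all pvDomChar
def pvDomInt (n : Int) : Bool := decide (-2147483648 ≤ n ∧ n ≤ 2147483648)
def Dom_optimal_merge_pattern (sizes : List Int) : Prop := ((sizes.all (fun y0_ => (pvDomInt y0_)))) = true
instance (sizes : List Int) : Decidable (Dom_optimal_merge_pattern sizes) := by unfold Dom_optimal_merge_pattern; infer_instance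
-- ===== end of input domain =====

-- B replaces A's re-sort-after-every-merge loop by the two-queue Huffman scheme (sort once, then
-- a linear merge loop); equivalence is about the RETURN value only: A sorts and empties the
-- caller's list in place, B leaves it untouched.

-- B replaces A's re-sort-after-every-merge loop by the two-queue Huffman scheme (sort once, then a
-- linear merge loop over the sorted originals and a FIFO queue of produced sums); equivalence is about
-- the RETURN value only: A sorts and empties the caller's list in place, B leaves it untouched.

-- ===== PORT A =====
-- the while-loop: pop the two front (smallest) elements, add their sum to cost, append it, re-sort
def pvALoop (l : List Int) (cost : Int) : Int :=
  match l with
  | a :: b :: rest =>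
      pvALoop (PySem.List.sorted (rest ++ [a + b]) (fun x => x)) (cost + (a + b))
  | _ => cost
termination_by l.length
decreasing_by simp [PySem.List.length_sorted]

def optimal_merge_pattern (sizes : List Int) : Int :=
  if sizes.length < 1 then 0
  else if sizes.length < 2 then PySem.List.pyGetD sizes 0 0
  else pvALoop (PySem.List.sorted sizes (fun x => x)) 0   -- sizes[0] on the one-element branch: list nonempty there, so pyGetD is exact

-- ===== PORT B =====
-- Source B's take(): pop the smaller front of the two queues (q1 preferred on ties)
def pvTake (q1 q2 : List Int) : Int × List Int × List Int :=
  match q1, q2 with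
  | x :: xs, [] => (x, xs, [])
  | x :: xs, y :: ys => if x ≤ y then (x, xs, y :: ys) else (y, x :: xs, ys)
  | [], y :: ys => (y, [], ys)
  | [], [] => (0, [], [])

-- Source B's for-loop over range(n - 1)
def pvBLoop : Nat → List Int → List Int → Int → Int
  | 0, _, _, cost => cost
  | k + 1, q1, q2, cost =>
      let (a, q1a, q2a) := pvTake q1 q2
      let (b, q1b, q2b) := pvTake q1a q2a
      pvBLoop k q1b (q2b ++ [a + b]) (cost + (a + b))

def optimal_merge_pattern_alt (sizes : List Int) : Int :=
  if sizes.length = 0 then 0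
  else if sizes.length = 1 then PySem.List.pyGetD sizes 0 0
  else pvBLoop (sizes.length - 1) (PySem.List.sorted sizes (fun x => x)) [] 0   -- sizes[0] on the one-element branch: list nonempty there, so pyGetD is exact

-- ===== PRECONDITION & SPEC =====
def Spec_optimal_merge_pattern (sizes : List Int) (out : Int) : Prop := out = optimal_merge_pattern_alt sizes
instance (sizes : List Int) (out : Int) : Decidable (Spec_optimal_merge_pattern sizes out) := by unfold Spec_optimal_merge_pattern; infer_instance

-- ===== CLAIM (what is proved, stated in full; the proofs are below) =====
def Claim_equal_optimal_merge_pattern : Prop := ∀ (sizes : List Int), Dom_optimal_merge_pattern sizes → Spec_optimal_merge_pattern sizes (optimal_merge_pattern sizes)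

-- ===== LEMMAS AND PROOFS =====

def pvC (q1 q2 : List Int) : Prop :=
  ∀ pre y post, q2 = pre ++ y :: post →
    ∀ u v, ([u, v] : List Int).Sublist (q1 ++ pre) → y ≤ u + v

lemma pvC_nil (q1 : List Int) : pvC q1 [] := by
  intro pre y post h
  exact absurd h (by simp)

lemma pair_sublist (u v : Int) (L1 L2 : List Int) (h1 : u ∈ L1) (h2 : v ∈ L2) :
    ([u, v] : List Int).Sublist (L1 ++ L2) :=
  (List.singleton_sublist.mpr h1).append (List.singleton_sublist.mpr h2)

lemma pvC_pop (q1' q1 fr q2' : List Int) (hsub : q1'.Sublist q1)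
    (h : pvC q1 (fr ++ q2')) : pvC q1' q2' := by
  intro pre y post hdec u v hpair
  exact h (fr ++ pre) y post (by simp [hdec]) u v
    (hpair.trans (by simpa using hsub.append (List.sublist_append_right fr pre)))

lemma pvTake_spec (q1 q2 : List Int)
    (h1 : q1.Pairwise (· ≤ ·)) (h2 : q2.Pairwise (· ≤ ·)) (hne : q1 ++ q2 ≠ []) :
    ∃ v q1' q2', pvTake q1 q2 = (v, q1', q2') ∧
      ((q1 = v :: q1' ∧ q2' = q2) ∨ (q2 = v :: q2' ∧ q1' = q1)) ∧
      (∀ z ∈ q1' ++ q2', v ≤ z) := by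
  match q1, q2 with
  | [], [] => simp at hne
  | x :: xs, [] =>
    refine ⟨x, xs, [], rfl, Or.inl ⟨rfl, rfl⟩, ?_⟩
    intro z hz
    simp only [List.append_nil] at hz
    exact List.rel_of_pairwise_cons h1 hz
  | [], y :: ys =>
    refine ⟨y, [], ys, rfl, Or.inr ⟨rfl, rfl⟩, ?_⟩
    intro z hz
    simp only [List.nil_append] at hz
    exact List.rel_of_pairwise_cons h2 hz
  | x :: xs, y :: ys =>
    by_cases hxy : x ≤ y
    · refine ⟨x, xs, y :: ys, by simp [pvTake, hxy], Or.inl ⟨rfl, rfl⟩, ?_⟩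
      intro z hz
      rcases List.mem_append.1 hz with hz | hz
      · exact List.rel_of_pairwise_cons h1 hz
      · rcases List.mem_cons.1 hz with rfl | hz
        · exact hxy
        · exact hxy.trans (List.rel_of_pairwise_cons h2 hz)
    · have hyx : y ≤ x := le_of_not_ge hxy
      refine ⟨y, x :: xs, ys, by simp [pvTake, hxy], Or.inr ⟨rfl, rfl⟩, ?_⟩
      intro z hz
      rcases List.mem_append.1 hz with hz | hz
      · rcases List.mem_cons.1 hz with rfl | hz
        · exact hyx
        · exact hyx.trans (List.rel_of_pairwise_cons h1 hz)
      · exact List.rel_of_pairwise_cons h2 hz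


lemma pvALoop_cons (a b : Int) (rest : List Int) (cost : Int) :
    pvALoop (a :: b :: rest) cost =
      pvALoop (PySem.List.sorted (rest ++ [a + b]) (fun x => x)) (cost + (a + b)) := by
  rw [pvALoop]

lemma pvMain : ∀ (k : Nat) (q1 q2 : List Int) (cost : Int),
    q1.Pairwise (· ≤ ·) → q2.Pairwise (· ≤ ·) → pvC q1 q2 →
    (q1 ++ q2).length = k + 1 →
    pvBLoop k q1 q2 cost = pvALoop (PySem.List.sorted (q1 ++ q2) (fun x => x)) cost := by
  intro k
  induction k with
  | zero =>
    intro q1 q2 cost h1 h2 hC hlen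
    obtain ⟨z, hz⟩ : ∃ z, PySem.List.sorted (q1 ++ q2) (fun x => x) = [z] := by
      have hl : (PySem.List.sorted (q1 ++ q2) (fun x => x)).length = 1 := by
        simp [PySem.List.length_sorted, hlen]
      exact List.length_eq_one_iff.1 hl
    simp [pvBLoop, hz, pvALoop]
  | succ k ih =>
    intro q1 q2 cost h1 h2 hC hlen
    have hne : q1 ++ q2 ≠ [] := by
      intro h; rw [h] at hlen; simp at hlen
    obtain ⟨a, q1a, q2a, hT1, hd1, hmin1⟩ := pvTake_spec q1 q2 h1 h2 hne
    have h1a : q1a.Pairwise (· ≤ ·) := by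
      rcases hd1 with ⟨hq, _⟩ | ⟨_, hq⟩
      · exact (List.pairwise_cons.1 (hq ▸ h1)).2
      · exact hq ▸ h1
    have h2a : q2a.Pairwise (· ≤ ·) := by
      rcases hd1 with ⟨_, hq⟩ | ⟨hq, _⟩
      · exact hq ▸ h2
      · exact (List.pairwise_cons.1 (hq ▸ h2)).2
    have hlen1 : (q1a ++ q2a).length = k + 1 := by
      rcases hd1 with ⟨hq, hq'⟩ | ⟨hq, hq'⟩ <;> rw [hq] at hlen <;> rw [hq'] <;>
        simp at hlen ⊢ <;> omega
    have hne1 : q1a ++ q2a ≠ [] := by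
      intro h; rw [h] at hlen1; simp at hlen1
    obtain ⟨b, q1b, q2b, hT2, hd2, hmin2⟩ := pvTake_spec q1a q2a h1a h2a hne1
    have hb_mem : b ∈ q1a ++ q2a := by
      rcases hd2 with ⟨hq, _⟩ | ⟨hq, _⟩ <;> rw [hq] <;> simp
    have hab : a ≤ b := hmin1 b hb_mem
    have hsubm : ∀ z ∈ q1b ++ q2b, z ∈ q1a ++ q2a := by
      intro z hz
      rcases hd2 with ⟨hq, hq'⟩ | ⟨hq, hq'⟩ <;> rw [hq] <;>
        rcases List.mem_append.1 hz with h | h <;> rw [← hq'] <;> simp [h]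
    have hamin : ∀ z ∈ q1b ++ q2b, a ≤ z := fun z hz => hmin1 z (hsubm z hz)
    have h1b : q1b.Pairwise (· ≤ ·) := by
      rcases hd2 with ⟨hq, _⟩ | ⟨_, hq⟩
      · exact (List.pairwise_cons.1 (hq ▸ h1a)).2
      · exact hq ▸ h1a
    have h2b : q2b.Pairwise (· ≤ ·) := by
      rcases hd2 with ⟨_, hq⟩ | ⟨hq, _⟩
      · exact hq ▸ h2a
      · exact (List.pairwise_cons.1 (hq ▸ h2a)).2
    have hperm1 : (q1 ++ q2).Perm (a :: (q1a ++ q2a)) := by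
      rcases hd1 with ⟨hq, hq'⟩ | ⟨hq, hq'⟩
      · rw [hq, hq']; exact List.Perm.refl _
      · rw [hq, hq']; exact List.perm_middle
    have hperm2 : (q1a ++ q2a).Perm (b :: (q1b ++ q2b)) := by
      rcases hd2 with ⟨hq, hq'⟩ | ⟨hq, hq'⟩
      · rw [hq, hq']; exact List.Perm.refl _
      · rw [hq, hq']; exact List.perm_middle
    have hperm : (q1 ++ q2).Perm (a :: b :: (q1b ++ q2b)) :=
      hperm1.trans (hperm2.cons a)
    -- the two key invariant facts, by cases on which queues the two pops came from
    have key : (∀ pre y post, q2b = pre ++ y :: post → y ≤ a + b) ∧ pvC q1b q2b := by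
      rcases hd1 with ⟨hq1, hq2a⟩ | ⟨hq2, hq1a⟩ <;>
        rcases hd2 with ⟨hq1a2, hq2b⟩ | ⟨hq2a2, hq1b⟩
      · -- both pops from q1: q1 = a :: b :: q1b, q2b = q2
        constructor
        · intro pre y post hdec
          refine hC pre y post (by rw [← hq2a, ← hq2b, hdec]) a b ?_
          rw [hq1, hq1a2]
          exact (((List.nil_sublist q1b).cons₂ b).cons₂ a).trans
            (List.sublist_append_left (a :: b :: q1b) pre)
        · refine pvC_pop q1b q1 [] q2b ?_ ?_
          · rw [hq1, hq1a2]
            exact (List.sublist_cons_self b q1b).trans (List.sublist_cons_self a (b :: q1b))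
          · rw [List.nil_append, hq2b, hq2a]; exact hC
      · -- a from q1, b from q2: q1 = a :: q1a, q2 = b :: q2b
        have hq2eq : q2 = b :: q2b := hq2a.symm.trans hq2a2
        constructor
        · intro pre y post hdec
          refine hC (b :: pre) y post (by rw [hq2eq, hdec]; simp) a b ?_
          exact pair_sublist a b q1 (b :: pre) (by rw [hq1]; simp) (by simp)
        · refine pvC_pop q1b q1 [b] q2b ?_ ?_
          · rw [hq1, hq1b]; exact List.sublist_cons_self a q1a
          · rw [show [b] ++ q2b = b :: q2b from rfl, ← hq2eq]; exact hC
      · -- a from q2, b from q1: q1 = b :: q1b, q2 = a :: q2b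
        have hq1eq : q1 = b :: q1b := hq1a.symm.trans hq1a2
        constructor
        · intro pre y post hdec
          have := hC (a :: pre) y post (by rw [hq2, ← hq2b, hdec]; simp) b a
            (pair_sublist b a q1 (a :: pre) (by rw [hq1eq]; simp) (by simp))
          omega
        · refine pvC_pop q1b q1 [a] q2b ?_ ?_
          · rw [hq1eq]; exact List.sublist_cons_self b q1b
          · rw [show [a] ++ q2b = a :: q2b from rfl, hq2b, ← hq2]; exact hC
      · -- both pops from q2: q2 = a :: b :: q2b, q1b = q1
        have hq2eq : q2 = a :: b :: q2b := by rw [hq2, hq2a2]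
        constructor
        · intro pre y post hdec
          refine hC (a :: b :: pre) y post (by rw [hq2eq, hdec]; simp) a b ?_
          exact (((List.nil_sublist pre).cons₂ b).cons₂ a).trans
            (List.sublist_append_right q1 (a :: b :: pre))
        · refine pvC_pop q1b q1 [a, b] q2b ?_ ?_
          · rw [hq1b, hq1a]
          · rw [show [a, b] ++ q2b = a :: b :: q2b from rfl, ← hq2eq]; exact hC
    obtain ⟨hub, hCb⟩ := key
    have hub' : ∀ y ∈ q2b, y ≤ a + b := by
      intro y hy
      obtain ⟨pre, post, hdec⟩ := List.append_of_mem hy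
      exact hub pre y post hdec
    -- the queue of sums stays sorted
    have h2b' : (q2b ++ [a + b]).Pairwise (· ≤ ·) := by
      rw [List.pairwise_append]
      exact ⟨h2b, by simp, by intro y hy z hz; simp at hz; subst hz; exact hub' y hy⟩
    -- ... and keeps the invariant
    have hCb' : pvC q1b (q2b ++ [a + b]) := by
      intro pre y post hdec u v hpair
      rcases List.eq_nil_or_concat post with rfl | ⟨post', c, rfl⟩
      · obtain ⟨hq2b, hy⟩ := List.append_inj' hdec (by simp)
        have hy' : y = a + b := by simpa using hy.symm
        subst hy'; subst hq2b
        have hu : u ∈ q1b ++ q2b := hpair.subset (show u ∈ [u, v] by simp)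
        have hv : v ∈ q1b ++ q2b := hpair.subset (show v ∈ [u, v] by simp)
        exact add_le_add (hamin u hu) (hmin2 v hv)
      · rw [List.concat_eq_append,
          show pre ++ y :: (post' ++ [c]) = (pre ++ y :: post') ++ [c] by simp] at hdec
        obtain ⟨hq2b, _⟩ := List.append_inj' hdec (by simp)
        exact hCb pre y post' hq2b u v hpair
    have hlen2 : (q1b ++ (q2b ++ [a + b])).length = k + 1 := by
      have hpl := hperm.length_eq
      simp at hpl hlen ⊢
      omega
    -- the sorted merged list starts with the two popped values
    have hS : PySem.List.sorted (q1 ++ q2) (fun x => x) =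
        a :: b :: PySem.List.sorted (q1b ++ q2b) (fun x => x) := by
      refine PySem.List.sorted_id_eq_of_perm_of_pairwise _ _ ?_ ?_
      · exact (((PySem.List.sorted_perm (q1b ++ q2b) (fun x => x) false).cons b).cons a).trans
          hperm.symm
      · rw [List.pairwise_cons, List.pairwise_cons]
        refine ⟨?_, ?_, PySem.List.sorted_pairwise _ _⟩
        · intro z hz
          rcases List.mem_cons.1 hz with rfl | hz
          · exact hab
          · exact hamin z ((PySem.List.mem_sorted _ _ _ _).1 hz)
        · intro z hz
          exact hmin2 z ((PySem.List.mem_sorted _ _ _ _).1 hz)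
    -- one step of each loop
    have hBstep : pvBLoop (k + 1) q1 q2 cost =
        pvBLoop k q1b (q2b ++ [a + b]) (cost + (a + b)) := by
      simp [pvBLoop, hT1, hT2]
    have hsortstep : PySem.List.sorted (PySem.List.sorted (q1b ++ q2b) (fun x => x) ++ [a + b]) (fun x => x)
        = PySem.List.sorted (q1b ++ (q2b ++ [a + b])) (fun x => x) := by
      refine PySem.List.sorted_eq_sorted_of_perm _ _ _ (fun x y h => h) ?_
      have hp := List.Perm.append_right [a + b] (PySem.List.sorted_perm (q1b ++ q2b) (fun x => x) false)
      simpa [List.append_assoc] using hp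
    rw [hBstep, hS, pvALoop_cons, hsortstep]
    exact ih q1b (q2b ++ [a + b]) (cost + (a + b)) h1b h2b' hCb' hlen2

-- ===== VERDICT (by name: the statement is the Claim_ definition above) =====
theorem optimal_merge_pattern_spec : Claim_equal_optimal_merge_pattern := by
  intro sizes _
  unfold Spec_optimal_merge_pattern
  unfold optimal_merge_pattern optimal_merge_pattern_alt
  by_cases h0 : sizes.length = 0
  · simp [h0]
  · by_cases h1 : sizes.length = 1
    · simp [h1]
    · have hge : 2 ≤ sizes.length := by omega
      rw [if_neg (by omega), if_neg (by omega), if_neg h0, if_neg h1]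
      have := pvMain (sizes.length - 1) (PySem.List.sorted sizes (fun x => x)) [] 0
        (by simpa using PySem.List.sorted_pairwise sizes (fun x => x))
        (by simp) (pvC_nil _)
        (by simp [PySem.List.length_sorted]; omega)
      rw [this, List.append_nil, PySem.List.sorted_sorted]
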